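-- pv_equiv track=rewrite | github.com/godwinjs/python | test_run.py | format_points
-- ===== SOURCE A (Python) =====
-- def format_points(hand):
--     """Helper function to calculate the total points of a blackjack hand.
--     """
--     total = 0
--     # Count the number of aces and deal with how to apply them at the end.
--     aces = 0
--     for card in hand:
--         if card in ['J', 'Q', 'K']:
--             total += 10
--         elif card == 'A':
--             aces += 1
--         else:
--             # Convert number cards (e.g. '7') to ints
--             total += int(card)
--     # At this point, total is the sum of this hand's cards *not counting aces*.
--
--     # Add aces, counting them as 1 for now. This is the smallest total we can make from this hand
--     total += aces
--     # "Upgrade" aces from 1 to 11 as long as it helps us get closer to 21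
--     # without busting
--     while total + 10 <= 21 and aces > 0:
--         # Upgrade an ace from 1 to 11
--         total += 10
--         aces -= 1
--     return total
-- ===== SOURCE B (Python) =====
-- def format_points(hand):
--     """Helper function to calculate the total points of a blackjack hand."""
--     # Value every card up front, counting each ace as 11.
--     total = sum(10 if card in ('J', 'Q', 'K') else 11 if card == 'A' else int(card)
--                 for card in hand)
--     aces = hand.count('A')
--     if total > 21 and aces:
--         # Downgrade (11 -> 1) exactly as many aces as needed, in closed form.
--         total -= 10 * min(aces, -(-(total - 21) // 10))
--     return total
-- ===== Notes on version B (the rewrite author's own statement) =====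
-- stated objective: idiomatic
-- what changed: B values every card up front (aces as 11) via a single sum plus a count, then downgrades the needed number of aces in one closed-form min/ceiling step, replacing A's two-phase accumulator loop and its iterative ace-upgrade while-loop.
import Mathlib
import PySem

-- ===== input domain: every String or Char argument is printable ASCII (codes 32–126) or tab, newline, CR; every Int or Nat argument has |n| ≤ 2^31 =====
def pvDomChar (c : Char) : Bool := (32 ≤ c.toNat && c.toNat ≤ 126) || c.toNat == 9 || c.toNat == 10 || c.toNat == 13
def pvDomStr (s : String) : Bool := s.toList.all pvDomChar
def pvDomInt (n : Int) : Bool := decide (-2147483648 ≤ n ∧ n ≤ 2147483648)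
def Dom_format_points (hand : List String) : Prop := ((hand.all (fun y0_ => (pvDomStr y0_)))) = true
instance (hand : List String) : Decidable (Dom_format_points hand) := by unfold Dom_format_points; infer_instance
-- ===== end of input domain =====

-- B values every card up front (aces as 11) and fixes the total with one closed-form
-- downgrade step instead of A's accumulator loop plus ace-upgrade while-loop (idiomatic, same O(n)).

-- ===== PORT A =====
-- one step of A's for-loop over the hand; state = (total, aces).
-- int(card) is (PySem.Int.ofStr? card).getD 0: Pre_format_points excludes the ValueError inputs.
def fpStepA (st : Int × Nat) (card : String) : Int × Nat :=
  if card = "J" ∨ card = "Q" ∨ card = "K" then (st.1 + 10, st.2)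
  else if card = "A" then (st.1, st.2 + 1)
  else (st.1 + (PySem.Int.ofStr? card).getD 0, st.2)

-- A's while-loop: upgrade aces from 1 to 11 while total + 10 <= 21 and aces > 0.
def fpUpgrade : Nat → Int → Int
  | 0, total => total
  | a + 1, total => if total + 10 ≤ 21 then fpUpgrade a (total + 10) else total

def format_points (hand : List String) : Int :=
  let st := hand.foldl fpStepA ((0 : Int), (0 : Nat))
  -- total += aces, then the upgrade while-loop
  fpUpgrade st.2 (st.1 + st.2)

-- ===== PORT B =====
-- value of a single card, counting an ace as 11 (B's generator expression)
def fpVal (card : String) : Int :=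
  if card = "J" ∨ card = "Q" ∨ card = "K" then 10
  else if card = "A" then 11
  else (PySem.Int.ofStr? card).getD 0

def format_points_alt (hand : List String) : Int :=
  let total := (hand.map fpVal).sum
  let aces : Nat := hand.count "A"
  if total > 21 ∧ aces ≠ 0 then
    -- total -= 10 * min(aces, -(-(total - 21) // 10))
    total - 10 * min (aces : Int) (-(PySem.Int.floordiv (-(total - 21)) 10))
  else total

-- ===== PRECONDITION & SPEC =====
-- Pre_ excludes exactly the hands on which A's int(card) raises ValueError.
def Pre_format_points (hand : List String) : Prop :=
  ∀ card ∈ hand,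
    card = "J" ∨ card = "Q" ∨ card = "K" ∨ card = "A" ∨ (PySem.Int.ofStr? card).isSome
instance (hand : List String) : Decidable (Pre_format_points hand) := by
  unfold Pre_format_points; infer_instance

def pvWitness_format_points : List String := ["A", "K", " 7 ", "A", "3"]

def Spec_format_points (hand : List String) (out : Int) : Prop := out = format_points_alt hand
instance (hand : List String) (out : Int) : Decidable (Spec_format_points hand out) := by
  unfold Spec_format_points; infer_instance

-- ===== CLAIM (what is proved, stated in full; the proofs are below) =====
def Claim_equal_format_points : Prop :=
  ∀ (hand : List String), Dom_format_points hand → Pre_format_points hand →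
    Spec_format_points hand (format_points hand)

-- ===== LEMMAS AND PROOFS =====

-- A's fold computes (non-ace sum, ace count) = (Σ fpVal - 11·count, count)
theorem fpFold_spec (hand : List String) (t : Int) (a : Nat) :
    hand.foldl fpStepA (t, a)
      = (t + (hand.map fpVal).sum - 11 * (hand.count "A" : Int), a + hand.count "A") := by
  induction hand generalizing t a with
  | nil => simp
  | cons c hs ih =>
    by_cases hJQK : c = "J" ∨ c = "Q" ∨ c = "K"
    · have hA : ¬ c = "A" := by rcases hJQK with h | h | h <;> simp [h]
      simp [fpStepA, fpVal, hJQK, hA, ih]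
      ring
    · by_cases hA : c = "A"
      · simp [fpStepA, fpVal, hA, ih]
        constructor <;> ring
      · simp [fpStepA, fpVal, hJQK, hA, ih]
        ring

-- characterization of A's upgrade while-loop
theorem fpUpgrade_spec (a : Nat) (t : Int) :
    fpUpgrade a t = t + 10 * min (a : Int) (max 0 ((21 - t) / 10)) := by
  induction a generalizing t with
  | zero => simp [fpUpgrade]
  | succ n ih =>
    rw [fpUpgrade]
    split_ifs with h
    · rw [ih]
      push_cast
      omega
    · push_cast
      omega

-- ===== VERDICT (by name: the statement is the Claim_ definition above) =====
theorem format_points_spec : Claim_equal_format_points := by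
  intro hand _ _
  unfold Spec_format_points format_points format_points_alt
  simp only [fpFold_spec, fpUpgrade_spec, zero_add]
  rw [PySem.Int.floordiv_eq_ediv_of_pos (by norm_num : (0:Int) < 10)]
  split_ifs with h <;> omega
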